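-- pv_equiv track=rewrite | github.com/TUC01108/cp | unit2/session1/p7.py | max_audience_performances
-- ===== SOURCE A (Python) =====
-- def max_audience_performances(audiences):
--     audience_count = {}
--     for audience in audiences:
--         if audience in audience_count:
--             audience_count[audience] += 1
--         else:
--             audience_count[audience] = 1
--     max_size = max(audiences)
--
--     if audience_count[max_size] > 1:
--         combined_audience_size = max_size * audience_count[max_size]
--     else:
--         combined_audience_size = max_size
--     return combined_audience_size
--
--
--     pass
-- ===== SOURCE B (Python) =====
-- def max_audience_performances(audiences):
--     m = audiences[0]
--     c = 0
--     for x in audiences: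
--         if x > m:
--             m, c = x, 1
--         elif x == m:
--             c += 1
--     return m * c if c > 1 else m
-- ===== Notes on version B (the rewrite author's own statement) =====
-- stated objective: faster
-- what changed: Replaces A's histogram-build-then-lookup (a frequency dict of every value, then max() and a dict lookup) with a single streaming pass that maintains only the running maximum and its running count (reset to 1 on a new maximum), with no table at all.
import Mathlib
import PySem

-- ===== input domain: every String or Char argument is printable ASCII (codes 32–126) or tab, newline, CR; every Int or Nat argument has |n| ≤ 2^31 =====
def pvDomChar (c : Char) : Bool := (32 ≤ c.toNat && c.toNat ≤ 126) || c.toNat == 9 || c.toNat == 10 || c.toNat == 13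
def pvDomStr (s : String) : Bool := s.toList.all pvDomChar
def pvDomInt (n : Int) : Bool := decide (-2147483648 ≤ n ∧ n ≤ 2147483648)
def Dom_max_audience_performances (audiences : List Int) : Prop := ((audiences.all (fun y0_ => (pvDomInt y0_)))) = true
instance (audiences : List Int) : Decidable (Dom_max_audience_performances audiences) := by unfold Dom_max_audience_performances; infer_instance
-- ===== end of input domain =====

-- B replaces A's frequency dictionary with one streaming pass keeping only the running maximum and its count (alternative decomposition, O(1) extra space).
-- ===== PORT A =====
def max_audience_performances (audiences : List Int) : Int :=
  let audience_count : PySem.Dict Int Int :=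
    audiences.foldl (fun d audience =>
      if d.contains audience then d.insert audience ((d.get? audience).getD 0 + 1)
      else d.insert audience 1) PySem.Dict.empty
  match PySem.List.max? audiences (fun x => x) with
  | none => 0   -- max([]) raises ValueError; excluded by Pre_
  | some max_size =>
    match audience_count.get? max_size with
    | none => 0 -- KeyError; unreachable when the list is nonempty
    | some c => if c > 1 then max_size * c else max_size

-- ===== PORT B =====
-- one step of B's loop: update (running max, its count)
def pvStepB (s : Int × Int) (x : Int) : Int × Int :=
  if x > s.1 then (x, 1) else if x = s.1 then (s.1, s.2 + 1) else s

def max_audience_performances_alt (audiences : List Int) : Int :=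
  match audiences with
  | [] => 0   -- audiences[0] raises IndexError; excluded by Pre_
  | a :: _ =>
    let r := audiences.foldl pvStepB (a, 0)
    if r.2 > 1 then r.1 * r.2 else r.1

-- ===== PRECONDITION & SPEC =====
-- Python raises on []: A a ValueError from max, B an IndexError from audiences[0].
def Pre_max_audience_performances (audiences : List Int) : Prop := audiences ≠ []
instance (audiences : List Int) : Decidable (Pre_max_audience_performances audiences) := by unfold Pre_max_audience_performances; infer_instance
def pvWitness_max_audience_performances : List Int := [3, 1, 3]

def Spec_max_audience_performances (audiences : List Int) (out : Int) : Prop := out = max_audience_performances_alt audiences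
instance (audiences : List Int) (out : Int) : Decidable (Spec_max_audience_performances audiences out) := by unfold Spec_max_audience_performances; infer_instance

-- ===== CLAIM =====
def Claim_equal_max_audience_performances : Prop := ∀ (audiences : List Int), Dom_max_audience_performances audiences → Pre_max_audience_performances audiences → Spec_max_audience_performances audiences (max_audience_performances audiences)

-- ===== LEMMAS AND PROOFS =====

-- A's histogram loop, characterised: the running dict's getD accumulates the count.
theorem loop_getD (l : List Int) (d : PySem.Dict Int Int) (v : Int) :
    (l.foldl (fun d audience =>
      if d.contains audience then d.insert audience ((d.get? audience).getD 0 + 1)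
      else d.insert audience 1) d).getD v 0 = d.getD v 0 + l.count v := by
  induction l generalizing d with
  | nil => simp
  | cons x t ih =>
    simp only [List.foldl_cons, ih, List.count_cons]
    by_cases hx : v = x
    · subst hx
      by_cases hc : d.contains v = true
      · rw [if_pos hc, PySem.Dict.getD_insert_self, PySem.Dict.getD_eq_get?_getD]
        push_cast
        simp
        ring
      · simp only [Bool.not_eq_true] at hc
        rw [if_neg (by simp [hc]), PySem.Dict.getD_insert_self,
            PySem.Dict.getD_of_not_contains d 0 hc]
        simp
        omega
    · split <;> rw [PySem.Dict.getD_insert] <;> simp [hx, Ne.symm hx]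

theorem loop_contains (l : List Int) (d : PySem.Dict Int Int) (v : Int) :
    (l.foldl (fun d audience =>
      if d.contains audience then d.insert audience ((d.get? audience).getD 0 + 1)
      else d.insert audience 1) d).contains v = (d.contains v || decide (v ∈ l)) := by
  induction l generalizing d with
  | nil => simp
  | cons x t ih =>
    simp only [List.foldl_cons, ih, List.mem_cons]
    by_cases hx : v = x
    · subst hx; split <;> rw [PySem.Dict.contains_insert] <;> simp
    · split <;> rw [PySem.Dict.contains_insert] <;>
        simp [beq_false_of_ne hx, hx]

-- B's streaming loop, characterised: first component is the running max …
theorem stepB_fst (l : List Int) (m c : Int) :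
    (l.foldl pvStepB (m, c)).1 = l.foldl max m := by
  induction l generalizing m c with
  | nil => rfl
  | cons x t ih =>
    simp only [List.foldl_cons, pvStepB]
    by_cases h1 : x > m
    · rw [if_pos h1, ih]; congr 1; omega
    · by_cases h2 : x = m
      · rw [if_neg h1, if_pos h2, ih]; congr 1; omega
      · rw [if_neg h1, if_neg h2, ih]; congr 1; omega

-- … and the second counts the occurrences of that max (plus the carried count if the max never grew).
theorem stepB_snd (l : List Int) (m c : Int) :
    (l.foldl pvStepB (m, c)).2 =
      (if l.foldl max m = m then c else 0) + l.count (l.foldl max m) := by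
  induction l generalizing m c with
  | nil => simp
  | cons x t ih =>
    have hfst : (x :: t).foldl max m = t.foldl max (max m x) := by simp
    simp only [List.foldl_cons, pvStepB]
    have hge : ∀ (a : Int) (u : List Int), a ≤ u.foldl max a := fun a u =>
      (PySem.List.le_foldl_max u a).1
    by_cases h1 : x > m
    · have hmx : max m x = x := by omega
      simp only [if_pos h1, ih, hfst, hmx]
      have hne : t.foldl max x ≠ m := by have := hge x t; omega
      rw [if_neg hne, List.count_cons]
      by_cases hx : t.foldl max x = x
      · simp [hx]; ring
      · simp [hx, Ne.symm hx]
    · have hmx : max m x = m := by omega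
      by_cases h2 : x = m
      · subst h2
        simp only [if_neg h1, if_pos rfl, ih, hfst, hmx, List.count_cons]
        by_cases hm : t.foldl max x = x
        · simp [hm]; omega
        · simp [hm, Ne.symm hm]
      · simp only [if_neg h1, if_neg h2, ih, hfst, hmx, List.count_cons]
        have hne : t.foldl max m ≠ x := by have := hge m t; omega
        simp [Ne.symm hne]

-- ===== VERDICT =====
theorem max_audience_performances_spec : Claim_equal_max_audience_performances := by
  intro audiences _ hpre
  unfold Spec_max_audience_performances max_audience_performances max_audience_performances_alt
  obtain ⟨a, t, rfl⟩ := List.exists_cons_of_ne_nil hpre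
  rw [PySem.List.max?_id_cons]
  set M := t.foldl max a with hM
  have hfold : (a :: t).foldl max a = M := by
    simp [hM]
  -- A's dict lookup at M
  have hmemM : M ∈ a :: t := by
    have := PySem.List.max?_mem (xs := a :: t) (key := fun x => x)
      (by rw [PySem.List.max?_id_cons])
    exact this
  have hcontains : ((a :: t).foldl (fun d audience =>
      if d.contains audience then d.insert audience ((d.get? audience).getD 0 + 1)
      else d.insert audience 1) (PySem.Dict.empty : PySem.Dict Int Int)).contains M = true := by
    rw [loop_contains]; simp [hmemM]
  have hgetD := loop_getD (a :: t) PySem.Dict.empty M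
  rw [PySem.Dict.getD_empty] at hgetD
  rw [PySem.Dict.contains_eq_isSome_get?] at hcontains
  -- B's loop result
  have hB1 : ((a :: t).foldl pvStepB (a, 0)).1 = M := by rw [stepB_fst, hfold]
  have hB2 : ((a :: t).foldl pvStepB (a, 0)).2 = ((a :: t).count M : Int) := by
    rw [stepB_snd, hfold]
    split <;> simp
  cases hget : ((a :: t).foldl (fun d audience =>
      if d.contains audience then d.insert audience ((d.get? audience).getD 0 + 1)
      else d.insert audience 1) (PySem.Dict.empty : PySem.Dict Int Int)).get? M with
  | none => rw [hget] at hcontains; simp at hcontains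
  | some c =>
    simp only [hget]
    rw [PySem.Dict.getD_eq_get?_getD, hget] at hgetD
    simp only [Option.getD_some, zero_add] at hgetD
    subst hgetD
    simp only [hB1, hB2]
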